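-- pv_equiv track=rewrite | github.com/df7cb/aoc | 2023/21b.py | center_squares
-- ===== SOURCE A (Python) =====
-- def center_squares(n):
--     o = 1
--     e = 0
--     i = 0
--     while i < n:
--         o += 4*i
--         i += 1
--         if i>=n: break
--         e += 4*i
--         i += 1
--     return o, e
-- ===== SOURCE B (Python) =====
-- def center_squares(n):
--     nn = max(n, 0)
--     k = (nn + 1) // 2   # count of even i in [0, n)
--     m = nn // 2         # count of odd i in [0, n)
--     return 1 + 4 * k * (k - 1), 4 * m * m
-- ===== Notes on version B (the rewrite author's own statement) =====
-- stated objective: faster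
-- what changed: Replaced the O(n) alternating-accumulation while loop by closed-form arithmetic-series sums by parity (sum of evens/odds below n), computed in O(1).
import Mathlib
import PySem

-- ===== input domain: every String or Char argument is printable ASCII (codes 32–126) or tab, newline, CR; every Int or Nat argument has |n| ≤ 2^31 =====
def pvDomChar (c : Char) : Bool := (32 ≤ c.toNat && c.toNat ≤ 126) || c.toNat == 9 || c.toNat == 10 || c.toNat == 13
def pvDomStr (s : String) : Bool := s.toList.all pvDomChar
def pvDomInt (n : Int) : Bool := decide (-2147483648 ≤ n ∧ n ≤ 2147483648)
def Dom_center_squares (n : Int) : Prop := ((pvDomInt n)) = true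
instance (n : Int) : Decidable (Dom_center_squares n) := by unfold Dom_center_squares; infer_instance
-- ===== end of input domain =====

-- B replaces A's O(n) alternating while loop by O(1) closed-form parity series sums (return value only).

-- ===== PORT A =====
-- the while loop of A: state (o, e, i), steps i by 1 with an early break mid-body
def csLoop (n o e i : Int) : Int × Int :=
  if _h : i < n then
    let o' := o + 4 * i
    let i' := i + 1
    if i' ≥ n then (o', e)
    else csLoop n o' (e + 4 * i') (i' + 1)
  else (o, e)
termination_by (n - i).toNat
decreasing_by omega

def center_squares (n : Int) : List Int :=
  let p := csLoop n 1 0 0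
  [p.1, p.2]

-- ===== PORT B =====
def center_squares_alt (n : Int) : List Int :=
  let nn := max n 0
  let k := PySem.Int.floordiv (nn + 1) 2
  let m := PySem.Int.floordiv nn 2
  [1 + 4 * k * (k - 1), 4 * m * m]

-- ===== PRECONDITION & SPEC =====
def Spec_center_squares (n : Int) (out : List Int) : Prop := out = center_squares_alt n
instance (n : Int) (out : List Int) : Decidable (Spec_center_squares n out) := by unfold Spec_center_squares; infer_instance

-- ===== CLAIM (what is proved, stated in full; the proofs are below) =====
def Claim_equal_center_squares : Prop := ∀ (n : Int), Dom_center_squares n → Spec_center_squares n (center_squares n)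

-- ===== LEMMAS AND PROOFS =====

-- Loop invariant: for even i ≥ 0 the loop adds 4·(sum of evens in [i, n)) to o and
-- 4·(sum of odds in [i, n)) to e, expressed in closed form via N = max n i.
theorem csLoop_eq (f : Nat) : ∀ (n o e i : Int), (n - i).toNat ≤ f → 0 ≤ i → i % 2 = 0 →
    csLoop n o e i =
      (o + 4 * (((max n i + 1) / 2) * ((max n i + 1) / 2 - 1) - (i / 2) * (i / 2 - 1)),
       e + 4 * ((max n i / 2) * (max n i / 2) - (i / 2) * (i / 2))) := by
  induction f with
  | zero =>
    intro n o e i hf hi h2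
    rw [csLoop]
    have hni : ¬ i < n := by omega
    simp only [hni, dite_false]
    obtain ⟨q, hq⟩ : ∃ q, i = 2 * q := ⟨i / 2, by omega⟩
    have hN : max n i = i := by omega
    have h1 : (i + 1) / 2 = q := by omega
    have h0 : i / 2 = q := by omega
    rw [hN, h1, h0, Prod.mk.injEq]
    subst hq
    exact ⟨by ring, by ring⟩
  | succ f ih =>
    intro n o e i hf hi h2
    rw [csLoop]
    obtain ⟨q, hq⟩ : ∃ q, i = 2 * q := ⟨i / 2, by omega⟩
    by_cases hni : i < n
    · simp only [hni, dite_true]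
      by_cases hbr : i + 1 ≥ n
      · -- n = i + 1: one odd step remains for o, none for e
        have hn : n = i + 1 := by omega
        simp only [hbr, if_true]
        have hN : max n i = i + 1 := by omega
        have h1 : (i + 1 + 1) / 2 = q + 1 := by omega
        have h0 : i / 2 = q := by omega
        have h2' : (i + 1) / 2 = q := by omega
        rw [hN, h1, h0, h2', Prod.mk.injEq]
        subst hq
        exact ⟨by ring, by ring⟩
      · simp only [hbr, if_false]
        rw [ih n (o + 4 * i) (e + 4 * (i + 1)) (i + 1 + 1) (by omega) (by omega) (by omega)]
        have hN : max n (i + 1 + 1) = n := by omega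
        have hN' : max n i = n := by omega
        have h0 : i / 2 = q := by omega
        have h2' : (i + 1 + 1) / 2 = q + 1 := by omega
        rw [hN, hN', h0, h2', Prod.mk.injEq]
        subst hq
        exact ⟨by ring, by ring⟩
    · simp only [hni, dite_false]
      have hN : max n i = i := by omega
      have h1 : (i + 1) / 2 = q := by omega
      have h0 : i / 2 = q := by omega
      rw [hN, h1, h0, Prod.mk.injEq]
      subst hq
      exact ⟨by ring, by ring⟩

-- ===== VERDICT (by name: the statement is the Claim_ definition above) =====
theorem center_squares_spec : Claim_equal_center_squares := by
  intro n _hd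
  unfold Spec_center_squares center_squares center_squares_alt
  rw [csLoop_eq (n - 0).toNat n 1 0 0 (le_refl _) (by omega) (by omega)]
  simp only [PySem.Int.floordiv_eq_ediv_of_pos (show (0:Int) < 2 by omega), List.cons.injEq, and_true]
  norm_num
  exact ⟨by ring, by ring⟩
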